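-- pv_equiv track=rewrite | github.com/klapzL/Neobis-Club | 1-2.py | show_duplicates
-- ===== SOURCE A (Python) =====
-- def show_duplicates(row):
--     numbers = 0
--     indexes = []
--     length = len(row)
--     for i in range(length):
--         for x in range(i+1, length):
--             if row[i] == row[x]:
--                 indexes.append([i,x])
--                 numbers += 1
--     return f'{numbers}, {indexes}'
-- ===== SOURCE B (Python) =====
-- def show_duplicates(row):
--     # Group positions by value once, then for each position emit the later
--     # positions of the same value directly (no pairwise comparisons).
--     pos = {}
--     for idx, v in enumerate(row):
--         pos.setdefault(v, []).append(idx)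
--     seen = {}
--     pairs = []
--     for i, v in enumerate(row):
--         c = seen.get(v, 0)
--         for x in pos[v][c + 1:]:
--             pairs.append([i, x])
--         seen[v] = c + 1
--     return f'{len(pairs)}, {pairs}'
-- ===== Notes on version B (the rewrite author's own statement) =====
-- stated objective: alternative
-- what changed: Replaces the all-pairs double scan with a single dict pass grouping positions by value, after which each index emits exactly the later same-value positions (no per-pair comparisons); on the duplicate-heavy timing inputs the output itself is quadratic, so a timing run shows no material speedup.
import Mathlib
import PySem

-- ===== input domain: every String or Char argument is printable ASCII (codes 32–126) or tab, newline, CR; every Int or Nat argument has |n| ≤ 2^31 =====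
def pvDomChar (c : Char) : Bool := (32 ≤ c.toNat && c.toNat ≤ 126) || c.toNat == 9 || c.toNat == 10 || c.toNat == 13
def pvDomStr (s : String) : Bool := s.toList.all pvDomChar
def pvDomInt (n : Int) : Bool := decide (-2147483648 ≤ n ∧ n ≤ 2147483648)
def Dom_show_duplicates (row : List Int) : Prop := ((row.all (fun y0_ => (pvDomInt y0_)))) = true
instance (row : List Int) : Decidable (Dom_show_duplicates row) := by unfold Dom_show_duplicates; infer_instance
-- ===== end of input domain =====

-- B groups the positions of each value in one dict pass and, for each index, emits the
-- later same-value positions directly instead of A's all-pairs double scan.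

-- shared formatting of Python's f'{numbers}, {indexes}' where indexes is a list of [i, x] pairs
def fmtPair (p : Int × Int) : String :=
  "[" ++ PySem.Int.toStr p.1 ++ ", " ++ PySem.Int.toStr p.2 ++ "]"
def fmtPairs (ps : List (Int × Int)) : String :=
  "[" ++ PySem.Str.join ", " (ps.map fmtPair) ++ "]"

-- ===== PORT A =====
-- row[i] / row[x] are always in range here, so pyGetD is exact
def show_duplicates (row : List Int) : String :=
  let length : Int := row.length
  let st := (PySem.List.pyRange 0 length 1).foldl
    (fun (s : Int × List (Int × Int)) i =>
      (PySem.List.pyRange (i + 1) length 1).foldl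
        (fun (s : Int × List (Int × Int)) x =>
          if PySem.List.pyGetD row i 0 == PySem.List.pyGetD row x 0 then
            (s.1 + 1, s.2 ++ [(i, x)])
          else s) s)
    (0, [])
  PySem.Int.toStr st.1 ++ ", " ++ fmtPairs st.2

-- ===== PORT B =====
-- pos.setdefault(v, []).append(idx)  ==  pos[v] = pos.get(v, []) + [idx]  ==  Dict.modify;
-- pos[v] is read with getD (v is always a key there)
def show_duplicates_alt (row : List Int) : String :=
  let pos := (PySem.List.enumerate row).foldl
    (fun (d : PySem.Dict Int (List Int)) p => d.modify p.2 [] (· ++ [p.1]))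
    PySem.Dict.empty
  let st := (PySem.List.enumerate row).foldl
    (fun (s : List (Int × Int) × PySem.Dict Int Int) p =>
      let c := s.2.getD p.2 0
      (s.1 ++ (PySem.List.slice (pos.getD p.2 []) (some (c + 1)) none).map (fun x => (p.1, x)),
       s.2.insert p.2 (c + 1)))
    ([], PySem.Dict.empty)
  PySem.Int.toStr (st.1.length : Int) ++ ", " ++ fmtPairs st.1

-- ===== PRECONDITION & SPEC =====
def Spec_show_duplicates (row : List Int) (out : String) : Prop := out = show_duplicates_alt row
instance (row : List Int) (out : String) : Decidable (Spec_show_duplicates row out) := by unfold Spec_show_duplicates; infer_instance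

-- ===== CLAIM (what is proved, stated in full; the proofs are below) =====
def Claim_equal_show_duplicates : Prop := ∀ (row : List Int), Dom_show_duplicates row → Spec_show_duplicates row (show_duplicates row)

-- ===== LEMMAS AND PROOFS =====

-- positions of value v in row, in ascending order
def occ (row : List Int) (v : Int) : List Int :=
  (PySem.List.pyRange 0 (row.length : Int) 1).filter (fun j => PySem.List.pyGetD row j 0 == v)

-- what A's inner loop appends for outer index i
def chA (row : List Int) (i : Int) : List (Int × Int) :=
  ((PySem.List.pyRange (i + 1) (row.length : Int) 1).filter
      (fun x => PySem.List.pyGetD row i 0 == PySem.List.pyGetD row x 0)).map (fun x => (i, x))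

-- what B's loop body appends at enumerate element p
def chB (row : List Int) (p : Int × Int) : List (Int × Int) :=
  (PySem.List.slice (occ row p.2) (some (((row.take p.1.toNat).count p.2 : Int) + 1)) none).map
    (fun x => (p.1, x))

-- A's two-accumulator conditional-append loop, in closed form
lemma foldl_count_append (l : List Int) (cond : Int → Bool) (g : Int → Int × Int)
    (a : Int) (acc : List (Int × Int)) :
    l.foldl (fun s x => if cond x then (s.1 + 1, s.2 ++ [g x]) else s) (a, acc)
      = (a + (l.countP cond : Int), acc ++ (l.filter cond).map g) := by
  induction l generalizing a acc with
  | nil => simp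
  | cons y t ih =>
    by_cases h : cond y
    · simp only [List.foldl_cons, h, if_pos, List.countP_cons, List.filter_cons, ih]
      refine Prod.ext ?_ ?_ <;> simp
      omega
    · simp [h, ih]

-- A's outer loop, in closed form
lemma foldl_outer (l : List Int) (c : Int → Int) (ch : Int → List (Int × Int))
    (a : Int) (acc : List (Int × Int)) :
    l.foldl (fun s i => (s.1 + c i, s.2 ++ ch i)) (a, acc)
      = (a + (l.map c).sum, acc ++ l.flatMap ch) := by
  induction l generalizing a acc with
  | nil => simp
  | cons y t ih => simp [ih]; ring

-- A as a flatMap of per-index chunks; its counter is the length of the pair list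
lemma showA (row : List Int) :
    show_duplicates row
      = PySem.Int.toStr ((((PySem.List.pyRange 0 (row.length : Int) 1).flatMap (chA row)).length : Int))
        ++ ", " ++ fmtPairs ((PySem.List.pyRange 0 (row.length : Int) 1).flatMap (chA row)) := by
  unfold show_duplicates
  have hstep : (fun (s : Int × List (Int × Int)) i =>
      (PySem.List.pyRange (i + 1) (row.length : Int) 1).foldl
        (fun (s : Int × List (Int × Int)) x =>
          if PySem.List.pyGetD row i 0 == PySem.List.pyGetD row x 0 then
            (s.1 + 1, s.2 ++ [(i, x)])
          else s) s)
      = (fun (s : Int × List (Int × Int)) i =>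
          (s.1 + (((PySem.List.pyRange (i + 1) (row.length : Int) 1).countP
              (fun x => PySem.List.pyGetD row i 0 == PySem.List.pyGetD row x 0) : Nat) : Int),
           s.2 ++ chA row i)) := by
    funext s i
    rw [show s = (s.1, s.2) from rfl, foldl_count_append]
    rfl
  simp only [hstep, foldl_outer, zero_add, List.nil_append]
  have hlen : ((PySem.List.pyRange 0 (row.length : Int) 1).map
      (fun i => (((PySem.List.pyRange (i + 1) (row.length : Int) 1).countP
          (fun x => PySem.List.pyGetD row i 0 == PySem.List.pyGetD row x 0) : Nat) : Int))).sum
      = (((PySem.List.pyRange 0 (row.length : Int) 1).flatMap (chA row)).length : Int) := by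
    rw [List.length_flatMap, Nat.cast_list_sum, List.map_map]
    congr 1
    apply List.map_congr_left
    intro i _
    simp [chA, List.countP_eq_length_filter]
  rw [hlen]

-- the grouping dict built by B returns exactly occ
lemma pos_getD (row : List Int) (v : Int) :
    ((PySem.List.enumerate row).foldl
      (fun (d : PySem.Dict Int (List Int)) p => d.modify p.2 [] (· ++ [p.1]))
      PySem.Dict.empty).getD v [] = occ row v := by
  have h : (PySem.List.enumerate row).foldl
      (fun (d : PySem.Dict Int (List Int)) p => d.modify p.2 [] (· ++ [p.1]))
      PySem.Dict.empty
      = ((PySem.List.enumerate row).map Prod.swap).foldl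
        (fun (d : PySem.Dict Int (List Int)) p => d.modify p.1 [] (· ++ [p.2]))
        PySem.Dict.empty := by
    rw [List.foldl_map]; rfl
  rw [h, PySem.Dict.getD_foldl_modify_append, PySem.Dict.getD_empty, List.nil_append,
    PySem.List.enumerate_eq_map_pyRange (d := 0), occ]
  simp [List.filter_map, List.map_map, Function.comp_def, Prod.swap]

-- the filtered prefix range counts occurrences in the prefix
lemma filter_range_count (row : List Int) (v : Int) :
    ∀ (m : Nat), m ≤ row.length →
    ((PySem.List.pyRange 0 (m : Int) 1).filter (fun j => PySem.List.pyGetD row j 0 == v)).length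
      = (row.take m).count v := by
  intro m
  induction m with
  | zero => simp
  | succ m ih =>
    intro hm
    have hm' : m < row.length := hm
    have hr : PySem.List.pyRange 0 ((m : Int) + 1) 1
        = PySem.List.pyRange 0 (m : Int) 1 ++ [(m : Int)] :=
      PySem.List.pyRange_one_succ_right (by positivity)
    rw [show (((m + 1 : Nat)) : Int) = (m : Int) + 1 by push_cast; ring, hr,
      List.filter_append, List.length_append, ih (le_of_lt hm'), List.take_add_one]
    have hget : PySem.List.pyGetD row ((m : Nat) : Int) 0 = row[m]'hm' := by
      rw [PySem.List.pyGetD_natCast]; simp [List.getD, List.getElem?_eq_getElem hm']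
    rw [List.count_append]
    simp only [List.getElem?_eq_getElem hm', Option.toList_some, hget, List.filter_cons,
      List.filter_nil, List.count_cons, List.count_nil]
    by_cases h : row[m]'hm' == v <;> simp [h]

-- B's main fold in closed form (invariant: seen counts occurrences in the processed prefix)
lemma Bfold (row : List Int) (pos : PySem.Dict Int (List Int))
    (hpos : ∀ v, pos.getD v [] = occ row v) :
    ∀ (t : List Int) (k : Nat) (acc : List (Int × Int)) (seen : PySem.Dict Int Int),
    row.drop k = t →
    (∀ v, seen.getD v 0 = ((row.take k).count v : Int)) →
    ((PySem.List.enumerate t k).foldl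
      (fun (s : List (Int × Int) × PySem.Dict Int Int) p =>
        let c := s.2.getD p.2 0
        (s.1 ++ (PySem.List.slice (pos.getD p.2 []) (some (c + 1)) none).map (fun x => (p.1, x)),
         s.2.insert p.2 (c + 1)))
      (acc, seen)).1
     = acc ++ (PySem.List.enumerate t k).flatMap (chB row) := by
  intro t
  induction t with
  | nil => intro k acc seen _ _; simp [PySem.List.enumerate_nil]
  | cons v t' ih =>
    intro k acc seen hdrop hseen
    have hk : k < row.length := by
      have := congrArg List.length hdrop
      simp at this; omega
    have hgk : row[k]'hk = v := by
      have h0 : (row.drop k)[0]'(by rw [hdrop]; simp) = v := by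
        simp [hdrop]
      rw [List.getElem_drop] at h0
      simpa using h0
    have htake : row.take (k + 1) = row.take k ++ [v] := by
      rw [List.take_add_one]
      simp [List.getElem?_eq_getElem hk, hgk]
    have hdrop' : row.drop (k + 1) = t' := by
      have : row.drop (k + 1) = (row.drop k).drop 1 := by
        rw [List.drop_drop]
      rw [this, hdrop]; rfl
    rw [PySem.List.enumerate_cons]
    simp only [List.foldl_cons, List.flatMap_cons]
    have hstep1 : seen.getD v 0 = ((row.take k).count v : Int) := hseen v
    have hchunk : (PySem.List.slice (pos.getD v []) (some (seen.getD v 0 + 1)) none).map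
        (fun x => ((k : Int), x)) = chB row ((k : Int), v) := by
      rw [hpos, hstep1, chB]
      simp
    have hseen' : ∀ v', (seen.insert v (seen.getD v 0 + 1)).getD v' 0
        = ((row.take (k + 1)).count v' : Int) := by
      intro v'
      rw [PySem.Dict.getD_insert, htake, List.count_append]
      by_cases h : v' = v
      · subst h
        simp [hstep1]
      · rw [List.count_singleton]
        simp [h, hseen v', Ne.symm h]
    have := ih (k + 1) (acc ++ chB row ((k : Int), v)) (seen.insert v (seen.getD v 0 + 1))
      hdrop' hseen'
    rw [show ((k : Int) + 1) = ((k + 1 : Nat) : Int) by push_cast; ring]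
    simp only at this ⊢
    rw [hchunk, this, List.append_assoc]

-- the per-index chunks agree: dropping the already-seen occurrences is A's inner scan
lemma chunks_eq (row : List Int) (j : Int) (hj : j ∈ PySem.List.pyRange 0 (row.length : Int) 1) :
    chB row (j, PySem.List.pyGetD row j 0) = chA row j := by
  rw [PySem.List.mem_pyRange_one] at hj
  obtain ⟨hj0, hjn⟩ := hj
  set k := j.toNat with hk
  have hjk : j = (k : Int) := by omega
  have hkn : k < row.length := by omega
  set v := PySem.List.pyGetD row j 0 with hv
  have hvk : v = row[k]'hkn := by
    rw [hv, hjk, PySem.List.pyGetD_natCast]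
    simp [List.getD, List.getElem?_eq_getElem hkn]
  have hsplit : PySem.List.pyRange 0 (row.length : Int) 1
      = PySem.List.pyRange 0 (j + 1) 1 ++ PySem.List.pyRange (j + 1) (row.length : Int) 1 :=
    PySem.List.pyRange_one_append 0 (j + 1) (row.length : Int) (by omega) (by omega)
  have hocc : occ row v
      = (PySem.List.pyRange 0 (j + 1) 1).filter (fun x => PySem.List.pyGetD row x 0 == v)
        ++ (PySem.List.pyRange (j + 1) (row.length : Int) 1).filter
             (fun x => PySem.List.pyGetD row x 0 == v) := by
    rw [occ, hsplit, List.filter_append]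
  have hlen1 : ((PySem.List.pyRange 0 (j + 1) 1).filter
      (fun x => PySem.List.pyGetD row x 0 == v)).length
      = (row.take k).count v + 1 := by
    have h1 : j + 1 = ((k + 1 : Nat) : Int) := by omega
    rw [h1, filter_range_count row v (k + 1) (by omega), List.take_add_one, List.count_append]
    simp [List.getElem?_eq_getElem hkn, hvk]
  have hdrop : (occ row v).drop ((row.take k).count v + 1)
      = (PySem.List.pyRange (j + 1) (row.length : Int) 1).filter
          (fun x => PySem.List.pyGetD row x 0 == v) := by
    rw [hocc, ← hlen1, List.drop_left]
  rw [chB, chA]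
  simp only
  rw [PySem.List.slice_from (occ row v) (a := ((row.take k).count v : Int) + 1) (by positivity)]
  have htn : (((row.take ((j, v).1.toNat)).count (j, v).2 : Int) + 1).toNat
      = (row.take k).count v + 1 := by simp [hk]
  rw [htn, hdrop]
  congr 1
  apply List.filter_congr
  intro x _
  rw [← hv, Bool.eq_iff_iff, beq_iff_eq, beq_iff_eq]
  exact eq_comm

theorem show_duplicates_eq (row : List Int) :
    show_duplicates row = show_duplicates_alt row := by
  rw [showA]
  unfold show_duplicates_alt
  have hfold := Bfold row _ (pos_getD row) row 0 [] PySem.Dict.empty (by simp) (by simp)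
  simp only [Nat.cast_zero] at hfold
  simp only [hfold, List.nil_append]
  have hflat : (PySem.List.enumerate row).flatMap (chB row)
      = (PySem.List.pyRange 0 (row.length : Int) 1).flatMap (chA row) := by
    rw [PySem.List.enumerate_eq_map_pyRange (d := 0)]
    rw [List.flatMap_def, List.flatMap_def, List.map_map]
    congr 1
    apply List.map_congr_left
    intro j hj
    exact chunks_eq row j hj
  rw [hflat]

-- ===== VERDICT (by name: the statement is the Claim_ definition above) =====
theorem show_duplicates_spec : Claim_equal_show_duplicates := by
  intro row _
  unfold Spec_show_duplicates
  exact show_duplicates_eq row
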